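-- pv_equiv track=rewrite | github.com/StoneChen917/COMP0016-Team-3 | src/Backend/Integration/mainpage.py | split_file_names
-- ===== SOURCE A (Python) =====
-- def split_file_names(string):
--     files = []
--     while string:
--         i = 0
--         file_end = 0
--         last_reached = False
--         keepgoing = True
--         if string[0] != "{":
--             while keepgoing:
--                 if i == len(string)-1:
--                     file_end = i
--                     last_reached = True
--                     keepgoing = False
--                 elif string[i] == " ":
--                     file_end = i
--                     keepgoing = False
--                 else:
--                     i += 1
--             if last_reached:
--                 files.append(string[0:])
--                 string = ""
--             else:
--                 files.append(string[:file_end])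
--                 string = string[file_end+1:]
--         else:
--             while keepgoing:
--                 if string[i] == "}" and i == len(string)-1:
--                     file_end = i
--                     last_reached = True
--                     keepgoing = False
--                 elif string[i] == "}" and string[i+1] == " ":
--                     file_end = i
--                     keepgoing = False
--                 else:
--                     i += 1
--             if last_reached:
--                 files.append(string[1:-1])
--                 string = ""
--             else:
--                 files.append(string[1:file_end])
--                 string = string[file_end+2:]
--
--     return files
-- ===== SOURCE B (Python) =====
-- def split_file_names(string):
--     # Single forward pass over the string using index positions and str.find;
--     # no re-slicing of the remaining suffix on every token (A is O(n^2), this is O(n)).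
--     files = []
--     n = len(string)
--     i = 0
--     while i < n:
--         if string[i] == "{":
--             j = string.find("} ", i + 1)
--             if j == -1:
--                 # closing brace is the last character of the string
--                 files.append(string[i + 1 : n - 1])
--                 i = n
--             else:
--                 files.append(string[i + 1 : j])
--                 i = j + 2
--         else:
--             j = string.find(" ", i)
--             if j == -1 or j == n - 1:
--                 files.append(string[i:])
--                 i = n
--             else:
--                 files.append(string[i:j])
--                 i = j + 1
--     return files
-- ===== Notes on version B (the rewrite author's own statement) =====
-- stated objective: faster
-- what changed: A repeatedly re-slices the remaining string after every token (string = string[k:]) and scans with a hand-rolled flag-driven while loop, which is O(n^2); B makes a single forward pass over the unchanged string keeping only an index i and locating each token end with str.find, O(n).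
import Mathlib
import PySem

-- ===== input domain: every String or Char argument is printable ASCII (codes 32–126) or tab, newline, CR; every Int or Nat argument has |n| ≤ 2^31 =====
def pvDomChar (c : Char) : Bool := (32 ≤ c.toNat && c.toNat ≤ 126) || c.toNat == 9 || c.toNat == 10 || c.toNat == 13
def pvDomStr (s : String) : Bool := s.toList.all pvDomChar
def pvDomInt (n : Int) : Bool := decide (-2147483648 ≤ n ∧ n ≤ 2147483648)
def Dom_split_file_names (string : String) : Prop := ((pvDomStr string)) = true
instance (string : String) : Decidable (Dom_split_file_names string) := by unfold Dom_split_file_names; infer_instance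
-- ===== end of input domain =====

-- B replaces A's quadratic loop (re-slicing the remaining suffix after every token) by a
-- single forward pass over index positions using str.find; objective: faster.

-- ===== PORT A =====
-- termination helpers for the index loops (cited by name in decreasing_by)
theorem pv_sub_lt (a i : Nat) (h : i < a) : a - (i + 1) < a - i := by omega
theorem pv_drop_lt (c : Char) (rest : List Char) (k : Nat) (hk : 0 < k) :
    ((c :: rest).drop k).length < (c :: rest).length := by simp; omega

-- A's inner plain-token scan: the while loop over i; returns (file_end, last_reached).
def scanPlain (t : List Char) (i : Nat) : Nat × Bool :=
  if h : i < t.length then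
    if i = t.length - 1 then (i, true)
    else if t[i] = ' ' then (i, false)
    else scanPlain t (i + 1)
  else (i, false)   -- unreachable from i = 0 on a nonempty list
termination_by t.length - i
decreasing_by exact pv_sub_lt _ _ h

-- A's inner brace scan; none = the scan runs off the end (Python raises IndexError there).
def scanBrace (t : List Char) (i : Nat) : Option (Nat × Bool) :=
  if h : i < t.length then
    if t[i] = '}' ∧ i = t.length - 1 then some (i, true)
    else if t[i] = '}' ∧ t.getD (i + 1) 'A' = ' ' then some (i, false)
    else scanBrace t (i + 1)
  else none
termination_by t.length - i
decreasing_by exact pv_sub_lt _ _ h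

-- A's outer while loop: each iteration cuts one token off the front and recurses on the
-- remaining suffix (the re-slicing is exactly A's `string = string[...:]`).
-- Slices: string[:k] = take k, string[k:] = drop k, string[1:-1] = (drop 1).dropLast,
-- string[1:k] = (drop 1).take (k-1) — exact for these in-range nonnegative indices.
def goA (t : List Char) : List (List Char) :=
  match t with
  | [] => []
  | c :: rest =>
    if c ≠ '{' then
      match scanPlain (c :: rest) 0 with
      | (file_end, last_reached) =>
        if last_reached then [c :: rest]
        else (c :: rest).take file_end :: goA ((c :: rest).drop (file_end + 1))
    else
      match scanBrace (c :: rest) 0 with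
      | none => []   -- Python raises IndexError here; excluded by Pre_
      | some (file_end, last_reached) =>
        if last_reached then [rest.dropLast]
        else rest.take (file_end - 1) :: goA ((c :: rest).drop (file_end + 2))
termination_by t.length
decreasing_by all_goals exact pv_drop_lt _ _ _ (Nat.succ_pos _)

def split_file_names (string : String) : List String :=
  (goA string.toList).map String.mk

-- ===== PORT B =====
-- string.find(c, k): first index j ≥ k with s[j] = c, none for Python's -1.
def pvFindCh (s : List Char) (c : Char) (k : Nat) : Option Nat :=
  if h : k < s.length then
    if s[k] = c then some k else pvFindCh s c (k + 1)
  else none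
termination_by s.length - k
decreasing_by exact pv_sub_lt _ _ h

-- string.find("} ", k): first index j ≥ k with s[j] = '}' and s[j+1] = ' '.
def pvFindBS (s : List Char) (k : Nat) : Option Nat :=
  if h : k + 1 < s.length then
    if s[k]'(by omega) = '}' ∧ s[k + 1] = ' ' then some k else pvFindBS s (k + 1)
  else none
termination_by s.length - k
decreasing_by exact pv_sub_lt _ _ (Nat.lt_of_succ_lt h)

-- B's single forward pass: i is the current position in the unchanged string s.
-- Slices string[a:b] (0 ≤ a ≤ b) = (s.drop a).take (b - a), string[i:] = s.drop i.
def goB (s : List Char) (fuel : Nat) (i : Nat) : List (List Char) :=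
  match fuel with
  | 0 => []   -- never reached when fuel ≥ s.length - i: every step advances i by at least 1
  | fuel + 1 =>
    if h : i < s.length then
      if s[i] = '{' then
        match pvFindBS s (i + 1) with
        | none => [(s.drop (i + 1)).take (s.length - 1 - (i + 1))]
        | some j => (s.drop (i + 1)).take (j - (i + 1)) :: goB s fuel (j + 2)
      else
        match pvFindCh s ' ' i with
        | none => [s.drop i]
        | some j =>
          if j = s.length - 1 then [s.drop i]
          else (s.drop i).take (j - i) :: goB s fuel (j + 1)
    else []

def split_file_names_alt (string : String) : List String :=
  (goB string.toList string.toList.length 0).map String.mk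

-- ===== PRECONDITION & SPEC =====
-- Pre_ excludes exactly the inputs on which A raises IndexError: a '{'-token whose brace
-- scan never meets a '}' followed by a space or a '}' as the final character.  wf is the
-- grammar of parsable strings: a sequence of tokens, each either brace-free up to a space,
-- or '{'…'}' closed before end-of-string or a space.
mutual
def wf : List Char → Bool
  | [] => true
  | c :: rest =>
    if c = '{' then wfBrace rest
    else if c = ' ' then wf rest
    else wfPlain rest
def wfPlain : List Char → Bool
  | [] => true
  | c :: rest => if c = ' ' then wf rest else wfPlain rest
def wfBrace : List Char → Bool
  | [] => false
  | c :: rest =>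
    if c = '}' then
      match rest with
      | [] => true
      | r :: rest' => if r = ' ' then wf rest' else wfBrace (r :: rest')
    else wfBrace rest
end

def Pre_split_file_names (string : String) : Prop := wf string.toList = true
instance (string : String) : Decidable (Pre_split_file_names string) := by
  unfold Pre_split_file_names; infer_instance

def pvWitness_split_file_names : String := "{a} b"

def Spec_split_file_names (string : String) (out : List String) : Prop := out = split_file_names_alt string
instance (string : String) (out : List String) : Decidable (Spec_split_file_names string out) := by unfold Spec_split_file_names; infer_instance

-- ===== CLAIM (what is proved, stated in full; the proofs are below) =====
def Claim_equal_split_file_names : Prop := ∀ (string : String), Dom_split_file_names string → Pre_split_file_names string → Spec_split_file_names string (split_file_names string)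

-- ===== LEMMAS AND PROOFS =====

theorem pvFindCh_ge (s : List Char) (c : Char) (k j : Nat) :
    pvFindCh s c k = some j → k ≤ j ∧ j < s.length := by
  intro hj
  rw [pvFindCh] at hj
  by_cases h : k < s.length
  · rw [dif_pos h] at hj
    by_cases hc : s[k] = c
    · rw [if_pos hc] at hj; cases hj; omega
    · rw [if_neg hc] at hj
      have := pvFindCh_ge s c (k + 1) j hj
      omega
  · rw [dif_neg h] at hj; cases hj
termination_by s.length - k

theorem pvFindBS_ge (s : List Char) (k j : Nat) :
    pvFindBS s k = some j → k ≤ j ∧ j + 1 < s.length := by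
  intro hj
  rw [pvFindBS] at hj
  by_cases h : k + 1 < s.length
  · rw [dif_pos h] at hj
    by_cases hc : s[k]'(by omega) = '}' ∧ s[k + 1] = ' '
    · rw [if_pos hc] at hj; cases hj; omega
    · rw [if_neg hc] at hj
      have := pvFindBS_ge s (k + 1) j hj
      omega
  · rw [dif_neg h] at hj; cases hj
termination_by s.length - k


theorem pvFindCh_cons (x : Char) (xs : List Char) (c : Char) (k : Nat) :
    pvFindCh (x :: xs) c (k + 1) = (pvFindCh xs c k).map (· + 1) := by
  rw [pvFindCh]
  conv_rhs => rw [pvFindCh]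
  by_cases h : k < xs.length
  · rw [dif_pos (show k + 1 < (x :: xs).length by simp; omega), dif_pos h]
    simp only [List.getElem_cons_succ]
    by_cases hc : xs[k] = c
    · rw [if_pos hc, if_pos hc]; rfl
    · rw [if_neg hc, if_neg hc]
      exact pvFindCh_cons x xs c (k + 1)
  · rw [dif_neg (by simp; omega), dif_neg h]; rfl
termination_by xs.length - k

theorem pvFindBS_cons (x : Char) (xs : List Char) (k : Nat) :
    pvFindBS (x :: xs) (k + 1) = (pvFindBS xs k).map (· + 1) := by
  rw [pvFindBS]
  conv_rhs => rw [pvFindBS]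
  by_cases h : k + 1 < xs.length
  · rw [dif_pos (show k + 1 + 1 < (x :: xs).length by simp; omega), dif_pos h]
    simp only [List.getElem_cons_succ]
    by_cases hc : xs[k]'(by omega) = '}' ∧ xs[k + 1] = ' '
    · rw [if_pos hc, if_pos hc]; rfl
    · rw [if_neg hc, if_neg hc]
      exact pvFindBS_cons x xs (k + 1)
  · rw [dif_neg (by simp; omega), dif_neg h]; rfl
termination_by xs.length - k

theorem pvFindCh_drop (i : Nat) (s : List Char) (c : Char) (k : Nat) :
    pvFindCh s c (i + k) = (pvFindCh (s.drop i) c k).map (· + i) := by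
  induction i generalizing s with
  | zero => simp only [Nat.zero_add, List.drop_zero]; cases pvFindCh s c k <;> simp
  | succ i ih =>
    cases s with
    | nil =>
      rw [show pvFindCh ([] : List Char) c (i + 1 + k) = none by rw [pvFindCh]; simp]
      simp [pvFindCh]
    | cons x xs =>
      rw [show i + 1 + k = (i + k) + 1 by omega, pvFindCh_cons, ih xs]
      simp only [List.drop_succ_cons]
      cases pvFindCh (xs.drop i) c k <;> simp <;> omega

theorem pvFindBS_drop (i : Nat) (s : List Char) (k : Nat) :
    pvFindBS s (i + k) = (pvFindBS (s.drop i) k).map (· + i) := by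
  induction i generalizing s with
  | zero => simp only [Nat.zero_add, List.drop_zero]; cases pvFindBS s k <;> simp
  | succ i ih =>
    cases s with
    | nil =>
      rw [show pvFindBS ([] : List Char) (i + 1 + k) = none by rw [pvFindBS]; simp]
      simp [pvFindBS]
    | cons x xs =>
      rw [show i + 1 + k = (i + k) + 1 by omega, pvFindBS_cons, ih xs]
      simp only [List.drop_succ_cons]
      cases pvFindBS (xs.drop i) k <;> simp <;> omega

-- A's plain scan, characterised by B's character find.
theorem plain_find (t : List Char) (k : Nat) (h : k < t.length) :
    scanPlain t k =
      match pvFindCh t ' ' k with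
      | none => (t.length - 1, true)
      | some j => if j < t.length - 1 then (j, false) else (t.length - 1, true) := by
  rw [scanPlain, dif_pos h]
  by_cases hl : k = t.length - 1
  · subst hl
    rw [if_pos rfl]
    have hch : pvFindCh t ' ' (t.length - 1) =
        if t[t.length - 1]'h = ' ' then some (t.length - 1) else none := by
      rw [pvFindCh, dif_pos h]
      by_cases hc : t[t.length - 1]'h = ' '
      · rw [if_pos hc, if_pos hc]
      · rw [if_neg hc, if_neg hc, pvFindCh, dif_neg (by omega)]
    rw [hch]
    by_cases hc : t[t.length - 1]'h = ' ' <;> simp [hc]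
  · rw [if_neg hl]
    rw [show pvFindCh t ' ' k = if t[k] = ' ' then some k else pvFindCh t ' ' (k + 1) from
      by rw [pvFindCh, dif_pos h]]
    by_cases hc : t[k] = ' '
    · rw [if_pos hc, if_pos hc]
      simp only []
      rw [if_pos (by omega)]
    · rw [if_neg hc, if_neg hc]
      exact plain_find t (k + 1) (by omega)
termination_by t.length - k

-- A's brace scan, characterised by B's "} " find.
theorem brace_find (t : List Char) (k : Nat) (h : k < t.length) :
    scanBrace t k =
      match pvFindBS t k with
      | some j => some (j, false)
      | none => if t.getD (t.length - 1) 'A' = '}' then some (t.length - 1, true) else none := by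
  rw [scanBrace, dif_pos h]
  by_cases hl : k = t.length - 1
  · subst hl
    have hbs : pvFindBS t (t.length - 1) = none := by rw [pvFindBS, dif_neg (by omega)]
    rw [hbs]
    have hg : t.getD (t.length - 1) 'A' = t[t.length - 1]'h := by
      rw [List.getD_eq_getElem?_getD, List.getElem?_eq_getElem h]; rfl
    by_cases hc : t[t.length - 1]'h = '}'
    · rw [if_pos ⟨hc, rfl⟩]
      simp only [hg, hc, if_pos]
    · rw [if_neg (by tauto)]
      rw [if_neg (show ¬(t[t.length - 1]'h = '}' ∧ t.getD (t.length - 1 + 1) 'A' = ' ') by tauto)]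
      rw [show scanBrace t (t.length - 1 + 1) = none by rw [scanBrace, dif_neg (by omega)]]
      rw [hg, if_neg hc]
  · have hk1 : k + 1 < t.length := by omega
    rw [show pvFindBS t k =
        if t[k] = '}' ∧ t[k + 1] = ' ' then some k else pvFindBS t (k + 1) from
      by rw [pvFindBS, dif_pos hk1]]
    have hgd : t.getD (k + 1) 'A' = t[k + 1] := by
      rw [List.getD_eq_getElem?_getD, List.getElem?_eq_getElem hk1]; rfl
    by_cases hc : t[k] = '}' ∧ t[k + 1] = ' '
    · rw [if_pos hc, if_neg (fun hx => hl hx.2), if_pos ⟨hc.1, by rw [hgd]; exact hc.2⟩]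
    · rw [if_neg hc, if_neg (fun hx => hl hx.2), if_neg (by rw [hgd]; exact hc)]
      exact brace_find t (k + 1) hk1
termination_by t.length - k

-- wf plumbing: the remainder after a complete token is again well-formed.
theorem wfPlain_step (t : List Char) (j : Nat) (hw : wfPlain t = true)
    (hf : pvFindCh t ' ' 0 = some j) : wf (t.drop (j + 1)) = true := by
  induction t generalizing j with
  | nil => rw [pvFindCh] at hf; simp at hf
  | cons x xs ih =>
    rw [pvFindCh, dif_pos (by simp)] at hf
    simp only [List.getElem_cons_zero] at hf
    by_cases hx : x = ' '
    · rw [if_pos hx] at hf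
      cases hf
      simpa [wfPlain, hx] using hw
    · rw [if_neg hx, show (0 : Nat) + 1 = 0 + 1 from rfl, pvFindCh_cons] at hf
      cases hj : pvFindCh xs ' ' 0 with
      | none => rw [hj] at hf; simp at hf
      | some j' =>
        rw [hj] at hf; simp at hf
        subst hf
        have := ih j' (by simpa [wfPlain, hx] using hw) hj
        simpa [List.drop_succ_cons] using this

theorem wfBrace_some (t : List Char) (j : Nat) (hw : wfBrace t = true)
    (hf : pvFindBS t 0 = some j) : wf (t.drop (j + 2)) = true := by
  induction t generalizing j with
  | nil => rw [pvFindBS] at hf; simp at hf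
  | cons x xs ih =>
    cases xs with
    | nil => rw [pvFindBS, dif_neg (by simp)] at hf; cases hf
    | cons y ys =>
      rw [pvFindBS, dif_pos (by simp)] at hf
      simp only [List.getElem_cons_zero, List.getElem_cons_succ] at hf
      by_cases hp : x = '}' ∧ y = ' '
      · rw [if_pos hp] at hf
        cases hf
        simp only [wfBrace, if_pos hp.1] at hw
        rw [if_pos hp.2] at hw
        simpa using hw
      · rw [if_neg hp, show (0 : Nat) + 1 = 0 + 1 from rfl, pvFindBS_cons] at hf
        cases hj : pvFindBS (y :: ys) 0 with
        | none => rw [hj] at hf; simp at hf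
        | some j' =>
          rw [hj] at hf; simp at hf
          subst hf
          have hw' : wfBrace (y :: ys) = true := by
            by_cases hx : x = '}'
            · simp only [wfBrace, if_pos hx] at hw
              have hy : ¬ y = ' ' := fun hy => hp ⟨hx, hy⟩
              rwa [if_neg hy] at hw
            · simpa [wfBrace, hx] using hw
          have := ih j' hw' hj
          simpa [List.drop_succ_cons] using this

theorem wfBrace_none (t : List Char) (hw : wfBrace t = true)
    (hf : pvFindBS t 0 = none) : t.getLast? = some '}' := by
  induction t with
  | nil => simp [wfBrace] at hw
  | cons x xs ih =>
    cases xs with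
    | nil =>
      simp only [wfBrace] at hw
      by_cases hx : x = '}'
      · simp [hx]
      · rw [if_neg hx] at hw; simp at hw
    | cons y ys =>
      rw [pvFindBS, dif_pos (by simp)] at hf
      simp only [List.getElem_cons_zero, List.getElem_cons_succ] at hf
      by_cases hp : x = '}' ∧ y = ' '
      · rw [if_pos hp] at hf; cases hf
      · rw [if_neg hp, show (0 : Nat) + 1 = 0 + 1 from rfl, pvFindBS_cons] at hf
        have hf' : pvFindBS (y :: ys) 0 = none := by
          cases hj : pvFindBS (y :: ys) 0 with
          | none => rfl
          | some j' => rw [hj] at hf; simp at hf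
        have hw' : wfBrace (y :: ys) = true := by
          by_cases hx : x = '}'
          · simp only [wfBrace, if_pos hx] at hw
            have hy : ¬ y = ' ' := fun hy => hp ⟨hx, hy⟩
            rwa [if_neg hy] at hw
          · simpa [wfBrace, hx] using hw
        have := ih hw' hf'
        rwa [List.getLast?_cons_cons]

-- corollaries of the scan characterisations with the match unfolded
theorem plain_find_none (t : List Char) (k : Nat) (h : k < t.length)
    (hf : pvFindCh t ' ' k = none) : scanPlain t k = (t.length - 1, true) := by
  rw [plain_find t k h, hf]

theorem plain_find_some (t : List Char) (k j : Nat) (h : k < t.length)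
    (hf : pvFindCh t ' ' k = some j) :
    scanPlain t k = if j < t.length - 1 then (j, false) else (t.length - 1, true) := by
  rw [plain_find t k h, hf]

theorem brace_find_none (t : List Char) (k : Nat) (h : k < t.length)
    (hf : pvFindBS t k = none) :
    scanBrace t k = if t.getD (t.length - 1) 'A' = '}'
      then some (t.length - 1, true) else none := by
  rw [brace_find t k h, hf]

theorem scanBrace_cons_skip (x : Char) (xs : List Char) (hx : x ≠ '}') :
    scanBrace (x :: xs) 0 = scanBrace (x :: xs) 1 := by
  rw [scanBrace, dif_pos (show 0 < (x :: xs).length by simp)]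
  simp only [List.getElem_cons_zero]
  rw [if_neg (fun h => hx h.1), if_neg (fun h => hx h.1)]

-- the main induction: A on the suffix s.drop i equals B at index i.
theorem goA_eq_goB (n : Nat) : ∀ (s : List Char) (i : Nat), s.length - i ≤ n →
    wf (s.drop i) = true → goA (s.drop i) = goB s n i := by
  induction n with
  | zero =>
    intro s i hn _
    rw [List.drop_eq_nil_of_le (by omega)]
    simp [goA, goB]
  | succ n ih =>
    intro s i hn hwf
    by_cases hi : i < s.length
    · have hcr : s.drop i = s[i]'hi :: s.drop (i + 1) := List.drop_eq_getElem_cons hi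
      have hlen2 : (s.drop (i + 1)).length = s.length - (i + 1) := by simp
      rw [goB, dif_pos hi]
      conv_lhs => rw [hcr]
      by_cases hc : s[i]'hi = '{'
      · -- brace token
        rw [if_pos hc, goA, if_neg (by simp [hc])]
        have hwb : wfBrace (s.drop (i + 1)) = true := by
          rw [hcr] at hwf
          simpa [wf, hc] using hwf
        have hne : s.drop (i + 1) ≠ [] := by
          intro hnil; rw [hnil] at hwb; simp [wfBrace] at hwb
        have hnp : 0 < (s.drop (i + 1)).length := List.length_pos_iff.mpr hne
        have hi1 : i + 1 < s.length := by omega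
        have hBS : pvFindBS s (i + 1) = (pvFindBS (s.drop (i + 1)) 0).map (· + (i + 1)) := by
          simpa using pvFindBS_drop (i + 1) s 0
        have hsb0 := scanBrace_cons_skip (s[i]'hi) (s.drop (i + 1)) (by rw [hc]; decide)
        have hbs1 : pvFindBS (s[i]'hi :: s.drop (i + 1)) 1 =
            (pvFindBS (s.drop (i + 1)) 0).map (· + 1) := pvFindBS_cons _ _ 0
        cases hb : pvFindBS (s.drop (i + 1)) 0 with
        | some j' =>
          have hsb : scanBrace (s[i]'hi :: s.drop (i + 1)) 0 = some (j' + 1, false) := by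
            rw [hsb0, brace_find (s[i]'hi :: s.drop (i + 1)) 1 (by simp only [List.length_cons]; omega), hbs1, hb]
            rfl
          rw [hsb]
          simp only []
          simp only [Bool.false_eq_true, if_false]
          split
          case _ heq =>   -- pvFindBS s (i+1) = none : contradiction
            rw [hBS, hb] at heq
            cases heq
          case _ j heq =>
            rw [hBS, hb] at heq
            simp only [Option.map_some, Option.some.injEq] at heq
            have hwf2 : wf (s.drop (j + 2)) = true := by
              have h2 := wfBrace_some _ _ hwb hb
              rw [List.drop_drop] at h2
              have h3 : i + 1 + (j' + 2) = j + 2 := by omega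
              rwa [h3] at h2
            have harr : (s[i]'hi :: s.drop (i + 1)).drop (j' + 1 + 2) = s.drop (j + 2) := by
              rw [show j' + 1 + 2 = (j' + 2) + 1 by omega, List.drop_succ_cons,
                  List.drop_drop, show i + 1 + (j' + 2) = j + 2 by omega]
            rw [show j' + 1 - 1 = j' from by omega, show j - (i + 1) = j' from by omega,
                harr]
            have hih := ih s (j + 2) (by omega) hwf2
            rw [hih]
        | none =>
          have hlast : (s.drop (i + 1)).getLast? = some '}' := wfBrace_none _ hwb hb
          have hlast' : (s.drop (i + 1))[(s.drop (i + 1)).length - 1]? = some '}' := by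
            rw [← List.getLast?_eq_getElem?]; exact hlast
          obtain ⟨m, hm⟩ : ∃ m, (s.drop (i + 1)).length = m + 1 := ⟨(s.drop (i + 1)).length - 1, by omega⟩
          have hgd : (s[i]'hi :: s.drop (i + 1)).getD
              ((s[i]'hi :: s.drop (i + 1)).length - 1) 'A' = '}' := by
            simp only [List.length_cons, Nat.add_sub_cancel]
            rw [hm, List.getD_cons_succ, List.getD_eq_getElem?_getD,
                show m = (s.drop (i + 1)).length - 1 by omega, hlast']
            rfl
          have hsb : scanBrace (s[i]'hi :: s.drop (i + 1)) 0 =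
              some ((s[i]'hi :: s.drop (i + 1)).length - 1, true) := by
            rw [hsb0, brace_find_none (s[i]'hi :: s.drop (i + 1)) 1 (by simp only [List.length_cons]; omega) (by rw [hbs1, hb]; rfl),
                if_pos hgd]
          rw [hsb]
          simp only []
          rw [if_true]
          split
          case _ heq =>   -- pvFindBS s (i+1) = none
            rw [List.dropLast_eq_take, hlen2,
                show s.length - (i + 1) - 1 = s.length - 1 - (i + 1) from by omega]
          case _ j heq =>   -- contradiction
            rw [hBS, hb] at heq
            cases heq
      · -- plain token
        rw [if_neg hc, goA, if_pos (by simp [hc])]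
        have hCH : pvFindCh s ' ' i = (pvFindCh (s.drop i) ' ' 0).map (· + i) := by
          simpa using pvFindCh_drop i s ' ' 0
        rw [hcr] at hCH
        cases hx : pvFindCh (s[i]'hi :: s.drop (i + 1)) ' ' 0 with
        | none =>
          rw [plain_find_none (s[i]'hi :: s.drop (i + 1)) 0 (by simp only [List.length_cons]; omega) hx]
          simp only []
          rw [if_true]
          split
          case _ heq => rw [hcr]
          case _ j heq =>
            rw [hCH, hx] at heq
            cases heq
        | some j0 =>
          have hj0 := pvFindCh_ge _ ' ' 0 j0 hx
          simp only [List.length_cons] at hj0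
          rw [plain_find_some (s[i]'hi :: s.drop (i + 1)) 0 j0 (by simp only [List.length_cons]; omega) hx]
          by_cases hjl : j0 < (s[i]'hi :: s.drop (i + 1)).length - 1
          · rw [if_pos hjl]
            simp only [List.length_cons] at hjl
            simp only []
            simp only [Bool.false_eq_true, if_false]
            split
            case _ heq =>
              rw [hCH, hx] at heq
              cases heq
            case _ j heq =>
              rw [hCH, hx] at heq
              simp only [Option.map_some, Option.some.injEq] at heq
              rw [if_neg (show ¬ j = s.length - 1 from by omega)]
              have hwf2 : wf (s.drop (j + 1)) = true := by
                by_cases hsp : s[i]'hi = ' '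
                · have hj00 : j0 = 0 := by
                    rw [pvFindCh, dif_pos (show 0 < (s[i]'hi :: s.drop (i + 1)).length
                      from by simp only [List.length_cons]; omega)] at hx
                    simp only [List.getElem_cons_zero, if_pos hsp] at hx
                    cases hx; rfl
                  rw [hcr] at hwf
                  have h4 : wf (s.drop (i + 1)) = true := by
                    simpa [wf, hc, hsp] using hwf
                  rwa [show j + 1 = i + 1 from by omega]
                · rw [pvFindCh, dif_pos (show 0 < (s[i]'hi :: s.drop (i + 1)).length
                      from by simp only [List.length_cons]; omega)] at hx
                  simp only [List.getElem_cons_zero, if_neg hsp] at hx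
                  rw [show (0 : Nat) + 1 = 0 + 1 from rfl, pvFindCh_cons] at hx
                  cases hy : pvFindCh (s.drop (i + 1)) ' ' 0 with
                  | none => rw [hy] at hx; cases hx
                  | some j'' =>
                    rw [hy] at hx
                    simp only [Option.map_some, Option.some.injEq] at hx
                    have hwp : wfPlain (s.drop (i + 1)) = true := by
                      rw [hcr] at hwf
                      simpa [wf, hc, hsp] using hwf
                    have h2 := wfPlain_step _ _ hwp hy
                    rw [List.drop_drop] at h2
                    have h3 : i + 1 + (j'' + 1) = j + 1 := by omega
                    rwa [h3] at h2
              have harr : (s[i]'hi :: s.drop (i + 1)).drop (j0 + 1) = s.drop (j + 1) := by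
                rw [List.drop_succ_cons, List.drop_drop,
                    show i + 1 + j0 = j + 1 from by omega]
              have hih := ih s (j + 1) (by omega) hwf2
              rw [hcr, show j - i = j0 from by omega, harr, hih]
          · rw [if_neg hjl]
            simp only [List.length_cons] at hjl
            simp only []
            rw [if_true]
            split
            case _ heq =>
              rw [hCH, hx] at heq
              cases heq
            case _ j heq =>
              rw [hCH, hx] at heq
              simp only [Option.map_some, Option.some.injEq] at heq
              rw [if_pos (show j = s.length - 1 from by
                have := hlen2
                omega)]
              rw [hcr]
    · rw [List.drop_eq_nil_of_le (by omega), goB, dif_neg hi]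
      simp [goA]

-- ===== VERDICT (by name: the statement is the Claim_ definition above) =====
theorem split_file_names_spec : Claim_equal_split_file_names := by
  intro s _ hpre
  unfold Spec_split_file_names split_file_names split_file_names_alt
  have h := goA_eq_goB s.toList.length s.toList 0 (by omega) (by simpa using hpre)
  rw [List.drop_zero] at h
  rw [h]
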